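-- pv_equiv track=rewrite | github.com/hassony2/interview-prep | permutation.py | arrangement_with_replacement
-- ===== SOURCE A (Python) =====
-- def arrangement_with_replacement(arr, n):
--     """Order matters"""
--     if n == 0:
--         return [[]]
--     else:
--         arrangs = []
--         for item in arr:
--             arrangs.extend([[item] + arrang for arrang in arrangement_with_replacement(arr, n - 1)])
--         return arrangs
-- ===== SOURCE B (Python) =====
-- def arrangement_with_replacement(arr, n):
--     """Order matters"""
--     result = [[]]
--     for _ in range(n):
--         result = [[item] + tail for item in arr for tail in result]
--     return result
-- ===== Notes on version B (the rewrite author's own statement) =====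
-- stated objective: alternative
-- what changed: Replaced the recursion that recomputes the full (n-1)-sub-result once per element of arr with a single iterative product loop that builds each level once and reuses it.
-- outside the precondition, e.g. on arrangement_with_replacement([], -1): A returns [], B returns [[]]
import Mathlib
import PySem

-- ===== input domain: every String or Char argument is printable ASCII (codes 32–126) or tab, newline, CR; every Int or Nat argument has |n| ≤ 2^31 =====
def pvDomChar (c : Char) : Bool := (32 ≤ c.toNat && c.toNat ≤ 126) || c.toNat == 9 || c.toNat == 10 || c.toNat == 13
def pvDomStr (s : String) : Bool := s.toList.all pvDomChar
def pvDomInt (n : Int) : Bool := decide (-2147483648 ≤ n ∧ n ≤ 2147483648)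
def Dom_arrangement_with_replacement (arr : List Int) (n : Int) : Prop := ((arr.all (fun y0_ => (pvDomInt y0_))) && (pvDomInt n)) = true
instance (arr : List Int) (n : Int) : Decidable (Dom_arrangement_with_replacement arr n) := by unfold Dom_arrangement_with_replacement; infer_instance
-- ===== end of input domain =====

-- B hoists the recomputed recursive sub-result into one iterative product loop that builds each level once.
-- ===== PORT A =====
-- A recurses on n; on n ≥ 0 (= Pre_) this fuel form is exact; for negative n and nonempty arr the Python raises RecursionError.
def pvAuxA (arr : List Int) : Nat → List (List Int)
  | 0 => [[]]
  | k + 1 => arr.foldl (fun arrangs item => arrangs ++ (pvAuxA arr k).map (fun arrang => item :: arrang)) []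

def arrangement_with_replacement (arr : List Int) (n : Int) : List (List Int) :=
  if n == 0 then [[]]
  else pvAuxA arr n.toNat

-- ===== PORT B =====
def arrangement_with_replacement_alt (arr : List Int) (n : Int) : List (List Int) :=
  (PySem.List.pyRange 0 n 1).foldl
    (fun result _ => arr.flatMap (fun item => result.map (fun tail => item :: tail))) [[]]

-- ===== PRECONDITION & SPEC =====
-- Pre_ excludes negative n: there A raises RecursionError for nonempty arr, and for empty arr returns an
-- accidental [] (fell out of the never-entered loop) where B's loop never runs and returns [[]].
def Pre_arrangement_with_replacement (arr : List Int) (n : Int) : Prop := 0 ≤ n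
instance (arr : List Int) (n : Int) : Decidable (Pre_arrangement_with_replacement arr n) := by
  unfold Pre_arrangement_with_replacement; infer_instance

def pvWitness_arrangement_with_replacement : List Int × Int := ([1, 2], 2)

def Spec_arrangement_with_replacement (arr : List Int) (n : Int) (out : List (List Int)) : Prop :=
  out = arrangement_with_replacement_alt arr n
instance (arr : List Int) (n : Int) (out : List (List Int)) :
    Decidable (Spec_arrangement_with_replacement arr n out) := by
  unfold Spec_arrangement_with_replacement; infer_instance

-- ===== CLAIM (what is proved, stated in full; the proofs are below) =====
def Claim_equal_arrangement_with_replacement : Prop :=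
  ∀ (arr : List Int) (n : Int), Dom_arrangement_with_replacement arr n →
    Pre_arrangement_with_replacement arr n →
    Spec_arrangement_with_replacement arr n (arrangement_with_replacement arr n)

-- ===== LEMMAS AND PROOFS =====
theorem pvAuxA_succ (arr : List Int) (k : Nat) :
    pvAuxA arr (k + 1) = arr.flatMap (fun item => (pvAuxA arr k).map (fun tail => item :: tail)) := by
  rw [pvAuxA]
  exact PySem.List.foldl_append_eq_flatMap _ arr []

theorem pvAuxA_eq_fold (arr : List Int) (k : Nat) :
    pvAuxA arr k =
      (PySem.List.pyRange 0 (k : Int) 1).foldl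
        (fun result _ => arr.flatMap (fun item => result.map (fun tail => item :: tail))) [[]] := by
  induction k with
  | zero => simp [pvAuxA, PySem.List.pyRange_one_eq_nil]
  | succ k ih =>
    have hsplit : PySem.List.pyRange 0 ((k : Int) + 1) 1
        = PySem.List.pyRange 0 (k : Int) 1 ++ [(k : Int)] := by
      exact PySem.List.pyRange_one_succ_right (by exact_mod_cast Int.ofNat_nonneg k)
    rw [pvAuxA_succ, ih]
    push_cast
    rw [hsplit, List.foldl_append]
    simp

theorem arrangement_with_replacement_spec : Claim_equal_arrangement_with_replacement := by
  intro arr n _ hn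
  unfold Spec_arrangement_with_replacement arrangement_with_replacement arrangement_with_replacement_alt
  have hcast : ((n.toNat : Int)) = n := Int.toNat_of_nonneg hn
  split_ifs with h
  · have : n = 0 := by simpa using h
    subst this
    simp [PySem.List.pyRange_one_eq_nil]
  · rw [pvAuxA_eq_fold, hcast]
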